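-- pv_equiv track=rewrite | github.com/TessaI159/euler | python/euler315_slow_memhog.py | efficient_toggle
-- ===== SOURCE A (Python) =====
-- numbers = \
--     {
--         1 : "0010010",
--         2 : "1011101",
--         3 : "1011011",
--         4 : "0111010",
--         5 : "1101011",
--         6 : "1101111",
--         7 : "1110010",
--         8 : "1111111",
--         9 : "1111011",
--         0 : "1110111"
--     }
--
-- def string_and(string1, string2):
--     """
--     Takes two strings of arbitrary length and returns a single string the same length as the longer string
--     """
--
--     string1 = str(string1)
--     string2 = str(string2)
--
--     if len(string1) > len(string2):
--         length_diff = len(string1) - len(string2)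
--         string2 = list(string2)
--         string2.reverse()
--         string2.extend(['0' for _ in range(length_diff)])
--         string2.reverse()
--         string2 = ''.join(string2)
--     elif len(string2) > len(string1):
--         length_diff = len(string2) - len(string1)
--         string1 = list(string1)
--         string1.reverse()
--         string1.extend(['0' for _ in range(length_diff)])
--         string1.reverse()
--         string1 = ''.join(string1)
--     else:
--         length_diff = None
--
--     new_string = []
--     for a, b in zip(string1, string2):
--         if a == '1' and b == '1':
--             new_string.append('1')
--         else:
--             new_string.append('0')
--     return ''.join(new_string)
--
-- def digital_sum(n):
--     n = str(n)
--     if len(n) == 1: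
--         return 0
--     ans = 0
--     for c in n:
--         ans += int(c)
--     return ans
--
-- def count_segments_str(n):
--     return sum([1 for c in n if c == '1'])
--
-- def change(a, b=None):
--     a_str = ''
--     b_str = ''
--
--     if b:
--         for i in str(a):
--             a_str += numbers[int(i)]
--         for i in str(b):
--             b_str += numbers[int(i)]
--
--     else:
--         for i in str(a):
--             a_str += numbers[int(i)]
--
--     return count_segments_str(a_str) - count_segments_str(string_and(a_str, b_str))
--
-- def efficient_toggle(num):
--     toggles = 0
--     numbers_to_display = []
--
--     while num != 0:
--         numbers_to_display.append(num)
--         num = digital_sum(num)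
--
--     for i, n in enumerate(numbers_to_display):
--         if i == 0:
--             toggles += change(n)
--         else:
--             toggles += change(n, numbers_to_display[i - 1])
--
--         if i == len(numbers_to_display) - 1:
--             toggles += change(n)
--         else:
--             toggles += change(n, numbers_to_display[i + 1])
--     return toggles
-- ===== SOURCE B (Python) =====
-- # Segment masks per digit, bit i = segment; mask of a number concatenates 7-bit blocks per digit.
-- SEG = [0b1110111, 0b0010010, 0b1011101, 0b1011011, 0b0111010,
--        0b1101011, 0b1101111, 0b1110010, 0b1111111, 0b1111011]
--
--
-- def _dsum(n):
--     s = 0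
--     while n:
--         s += n % 10
--         n //= 10
--     return s
--
--
-- def _mask(n):
--     m, shift = 0, 0
--     while True:
--         m |= SEG[n % 10] << shift
--         n //= 10
--         shift += 7
--         if n == 0:
--             break
--     return m
--
--
-- def _pc(x):
--     return bin(x).count("1")
--
--
-- def efficient_toggle(num):
--     chain = []
--     n = num
--     while n != 0:
--         chain.append(n)
--         n = 0 if n < 10 else _dsum(n)
--     if not chain:
--         return 0
--     total = _pc(_mask(chain[0])) + _pc(_mask(chain[-1]))
--     for a, b in zip(chain, chain[1:]):
--         total += _pc(_mask(a) ^ _mask(b))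
--     return total
-- ===== Notes on version B (the rewrite author's own statement) =====
-- stated objective: faster
-- what changed: Replaces the per-position double loop of change(n,prev)/change(n,next) over padded 7-segment bit-strings with integer bit masks: one pass adds popcount(mask(first)), popcount(mask(last)) and popcount(mask(a) XOR mask(b)) over adjacent chain pairs, with digit sums computed arithmetically instead of via str().
import Mathlib
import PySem

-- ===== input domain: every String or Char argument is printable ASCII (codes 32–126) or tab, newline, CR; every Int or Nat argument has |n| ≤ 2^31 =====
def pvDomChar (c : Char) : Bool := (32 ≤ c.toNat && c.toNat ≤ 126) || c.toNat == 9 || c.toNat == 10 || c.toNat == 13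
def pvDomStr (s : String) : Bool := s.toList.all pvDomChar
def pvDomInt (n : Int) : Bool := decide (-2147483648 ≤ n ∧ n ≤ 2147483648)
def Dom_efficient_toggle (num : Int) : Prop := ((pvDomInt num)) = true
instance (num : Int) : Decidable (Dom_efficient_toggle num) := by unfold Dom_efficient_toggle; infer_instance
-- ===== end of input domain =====

-- B replaces A's per-position change(n,prev)/change(n,next) double loop over padded 7-segment
-- bit-STRINGS by integer bit masks: popcount(first) + popcount(last) + popcount(mask a XOR mask b)
-- over adjacent chain pairs, with arithmetic digit sums (objective: faster, constant factor).

-- ===== PORT A =====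

-- the module-level 'numbers' dict, inserted in source order
def pyNumbers : PySem.Dict Int String :=
  ((((((((((PySem.Dict.empty.insert 1 "0010010").insert 2 "1011101").insert 3 "1011011").insert
      4 "0111010").insert 5 "1101011").insert 6 "1101111").insert 7 "1110010").insert
      8 "1111111").insert 9 "1111011").insert 0 "1110111")

-- string_and: both arguments are already str (str() is the identity); strings as char lists
def string_and (string1 string2 : List Char) : List Char :=
  if string1.length > string2.length then
    (string1.zip ((string2.reverse ++
        List.replicate (string1.length - string2.length) '0').reverse)).map
      (fun ab => if ab.1 == '1' && ab.2 == '1' then '1' else '0')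
  else if string2.length > string1.length then
    (((string1.reverse ++
        List.replicate (string2.length - string1.length) '0').reverse).zip string2).map
      (fun ab => if ab.1 == '1' && ab.2 == '1' then '1' else '0')
  else
    (string1.zip string2).map (fun ab => if ab.1 == '1' && ab.2 == '1' then '1' else '0')

-- int(c) would raise ValueError on a non-digit char ('-' of a negative n); Pre_ excludes that
def digital_sum (n : Int) : Int :=
  let s := PySem.Int.toChars n
  if s.length == 1 then 0
  else s.foldl (fun ans c => ans + (PySem.Int.ofChars? [c]).getD 0) 0

def count_segments_str (n : List Char) : Int :=
  ((n.filter (fun c => c == '1')).map (fun _ => (1 : Int))).sum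

-- the "for i in str(a): a_str += numbers[int(i)]" loop (KeyError/ValueError unreachable under Pre_)
def segcat (a : Int) : List Char :=
  (PySem.Int.toChars a).foldl
    (fun acc i => acc ++ (pyNumbers.getD ((PySem.Int.ofChars? [i]).getD 0) "").toList) []

def change (a : Int) (b : Option Int) : Int :=
  -- 'if b:' — None and 0 are falsy
  let bt : Bool := match b with | none => false | some v => v != 0
  let a_str := segcat a
  let b_str := if bt then segcat (b.getD 0) else []
  count_segments_str a_str - count_segments_str (string_and a_str b_str)

-- the 'while num != 0' loop; fuel is a totality guard only (the chain strictly decreases,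
-- so |num|+1 steps always suffice)
def chainA : Nat → Int → List Int
  | 0, _ => []
  | f + 1, n => if n == 0 then [] else n :: chainA f (digital_sum n)

-- the 'for i, n in enumerate(numbers_to_display)' accumulation loop
def toggleLoop (nums : List Int) : Int :=
  (PySem.List.enumerate nums).foldl
    (fun toggles p =>
      toggles +
        (if p.1 == 0 then change p.2 none
         else change p.2 (some (PySem.List.pyGetD nums (p.1 - 1) 0))) +
        (if p.1 == (nums.length : Int) - 1 then change p.2 none
         else change p.2 (some (PySem.List.pyGetD nums (p.1 + 1) 0)))) 0

def efficient_toggle (num : Int) : Int :=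
  toggleLoop (chainA (num.natAbs + 1) num)

-- ===== PORT B =====

def segListB : List Int := [119, 18, 93, 91, 58, 107, 111, 114, 127, 123]

-- 'while n: s += n % 10; n //= 10' (fuel is a totality guard only)
def dsumB_go : Nat → Int → Int → Int
  | 0, _, s => s
  | f + 1, n, s =>
      if n == 0 then s else dsumB_go f (PySem.Int.floordiv n 10) (s + PySem.Int.mod n 10)

def dsumB (n : Int) : Int := dsumB_go (n.natAbs + 1) n 0

-- the do-while of _mask; shift only ever grows by 7 from 0, kept as a Nat for '<<<'
def maskB_go : Nat → Int → Int → Nat → Int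
  | 0, _, m, _ => m
  | f + 1, n, m, shift =>
      let m' := PySem.Int.bor m ((PySem.List.pyGetD segListB (PySem.Int.mod n 10) 0) <<< shift)
      let n' := PySem.Int.floordiv n 10
      if n' == 0 then m' else maskB_go f n' m' (shift + 7)

def maskB (n : Int) : Int := maskB_go (n.natAbs + 1) n 0 0

-- bin(x).count("1") — equals bit_count for the nonnegative masks produced here
def pcB (x : Int) : Int := (PySem.Int.bitCount x : Int)

-- the chain loop of Source B: next value is 0 for n < 10, else the arithmetic digit sum
def chainB : Nat → Int → List Int
  | 0, _ => []
  | f + 1, n => if n == 0 then [] else n :: chainB f (if n < 10 then 0 else dsumB n)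

def totalB (chain : List Int) : Int :=
  if chain.isEmpty then 0
  else
    -- the loop starts from total = segments of the first plus last display
    (chain.zip chain.tail).foldl
      (fun total ab => total + pcB (PySem.Int.bxor (maskB ab.1) (maskB ab.2)))
      (pcB (maskB (PySem.List.pyGetD chain 0 0)) +
       pcB (maskB (PySem.List.pyGetD chain (-1) 0)))

def efficient_toggle_alt (num : Int) : Int :=
  totalB (chainB (num.natAbs + 1) num)

-- ===== PRECONDITION & SPEC =====

-- Pre_ excludes exactly the negative inputs, on which A raises ValueError (int('-')).
def Pre_efficient_toggle (num : Int) : Prop := 0 ≤ num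
instance (num : Int) : Decidable (Pre_efficient_toggle num) := by
  unfold Pre_efficient_toggle; infer_instance

def pvWitness_efficient_toggle : Int := 42

def Spec_efficient_toggle (num : Int) (out : Int) : Prop := out = efficient_toggle_alt num
instance (num : Int) (out : Int) : Decidable (Spec_efficient_toggle num out) := by
  unfold Spec_efficient_toggle; infer_instance

-- ===== CLAIM (what is proved, stated in full; the proofs are below) =====
def Claim_equal_efficient_toggle : Prop :=
  ∀ (num : Int), Dom_efficient_toggle num → Pre_efficient_toggle num →
    Spec_efficient_toggle num (efficient_toggle num)

-- ===== LEMMAS AND PROOFS =====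

-- digit/segment vocabulary used only by the proofs
def pvSeg (d : Nat) : Nat := [119, 18, 93, 91, 58, 107, 111, 114, 127, 123].getD d 0

def pvPC (x : Nat) : Nat := PySem.Int.bitCount (x : Int)

def pvBits (x : Nat) : List Char :=
  [if x.testBit 6 then '1' else '0', if x.testBit 5 then '1' else '0',
   if x.testBit 4 then '1' else '0', if x.testBit 3 then '1' else '0',
   if x.testBit 2 then '1' else '0', if x.testBit 1 then '1' else '0',
   if x.testBit 0 then '1' else '0']

def pvCnt (l : List Char) : Nat := (l.filter (fun c => c == '1')).length

def pvA7 (x y : Nat) : Nat :=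
  pvCnt (((pvBits x).zip (pvBits y)).map (fun ab => if ab.1 == '1' && ab.2 == '1' then '1' else '0'))

def pvBB (v : List Nat) : List Char := (v.map pvBits).flatten

def pvMV : List Nat → Nat
  | [] => 0
  | d :: t => pvSeg d + 128 * pvMV t

def pvCS (l : List Nat) : Nat := (l.map (fun d => pvCnt (pvBits (pvSeg d)))).sum

def pvSX (l1 l2 : List Nat) : Nat :=
  (List.zipWith (fun d e => pvA7 (pvSeg d) (pvSeg e)) l1 l2).sum

def pvDigits (n : Int) : List Nat := Nat.digits 10 n.toNat

-- small decidable facts about the ten digits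
lemma pvSeg_lt : ∀ d, d < 10 → pvSeg d < 128 := by decide

lemma pvPC_seg : ∀ d, d < 10 → pvPC (pvSeg d) = pvCnt (pvBits (pvSeg d)) := by decide

lemma pvPair : ∀ d, d < 10 → ∀ e, e < 10 →
    pvCnt (pvBits (pvSeg d)) + pvCnt (pvBits (pvSeg e))
      = pvPC (pvSeg d ^^^ pvSeg e) + pvA7 (pvSeg d) (pvSeg e) + pvA7 (pvSeg e) (pvSeg d) := by
  decide

lemma pvLookupA : ∀ d, d < 10 →
    (pyNumbers.getD ((PySem.Int.ofChars? [Nat.digitChar d]).getD 0) "").toList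
      = pvBits (pvSeg d) := by decide

lemma pvLookupB : ∀ d, d < 10 → segListB.getD d 0 = ((pvSeg d : Nat) : Int) := by decide

lemma pvDigitVal : ∀ d, d < 10 → (PySem.Int.ofChars? [Nat.digitChar d]).getD 0 = (d : Int) := by
  decide

lemma pvA7_seg_zero : ∀ d, d < 10 → pvA7 (pvSeg d) 0 = 0 ∧ pvA7 0 (pvSeg d) = 0 := by decide

-- bit-level arithmetic
lemma pvPC_zero : pvPC 0 = 0 := by
  simp [pvPC, PySem.Int.bitCount_zero]

lemma pvPC_split : ∀ (k a x : Nat), x < 2 ^ k → pvPC (2 ^ k * a + x) = pvPC a + pvPC x := by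
  intro k
  induction k with
  | zero =>
    intro a x hx
    interval_cases x
    simp [pvPC_zero]
  | succ k ih =>
    intro a x hx
    by_cases h0 : 2 ^ (k + 1) * a + x = 0
    · have hx0 : x = 0 := by omega
      have ha0 : a = 0 := by
        rcases Nat.mul_eq_zero.mp (by omega : 2 ^ (k + 1) * a = 0) with h | h
        · have hp : 0 < 2 ^ (k + 1) := Nat.two_pow_pos _
          omega
        · exact h
      subst hx0; subst ha0; simp [pvPC_zero]
    · have hpos : 0 < 2 ^ (k + 1) * a + x := Nat.pos_of_ne_zero h0
      have hpow : (2 : Nat) ^ (k + 1) = 2 * 2 ^ k := by rw [pow_succ]; ring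
      have key : 2 ^ (k + 1) * a + x = 2 * (2 ^ k * a) + x := by rw [pow_succ]; ring
      have e1 : (2 ^ (k + 1) * a + x) % 2 = x % 2 := by rw [key]; omega
      have e2 : (2 ^ (k + 1) * a + x) / 2 = 2 ^ k * a + x / 2 := by rw [key]; omega
      have hx2 : x / 2 < 2 ^ k := by omega
      unfold pvPC at *
      rw [PySem.Int.bitCount_natCast hpos, e1, e2, ih a (x / 2) hx2]
      by_cases hx0 : x = 0
      · subst hx0; simp [PySem.Int.bitCount_zero]
      · rw [PySem.Int.bitCount_natCast (Nat.pos_of_ne_zero hx0)]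
        omega

lemma pvOrShift (k a x : Nat) (hx : x < 2 ^ k) : x ||| a * 2 ^ k = x + a * 2 ^ k := by
  apply Nat.eq_of_testBit_eq
  intro j
  have hrhs : x + a * 2 ^ k = 2 ^ k * a + x := by ring
  have hsh : a * 2 ^ k = a <<< k := by rw [Nat.shiftLeft_eq]
  rw [hrhs, hsh, Nat.testBit_or, Nat.testBit_shiftLeft, Nat.testBit_two_pow_mul_add a hx j]
  by_cases hj : j < k
  · have h2 : ¬ (j ≥ k) := by omega
    simp [hj, h2]
  · have hxj : x.testBit j = false :=
      Nat.testBit_lt_two_pow (lt_of_lt_of_le hx (Nat.pow_le_pow_right (by norm_num) (by omega)))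
    have h2 : j ≥ k := by omega
    simp [hj, h2, hxj]

lemma pvXorSplit (k a b x y : Nat) (hx : x < 2 ^ k) (hy : y < 2 ^ k) :
    (2 ^ k * a + x) ^^^ (2 ^ k * b + y) = 2 ^ k * (a ^^^ b) + (x ^^^ y) := by
  apply Nat.eq_of_testBit_eq
  intro j
  have hxy : x ^^^ y < 2 ^ k := Nat.xor_lt_two_pow hx hy
  rw [Nat.testBit_xor, Nat.testBit_two_pow_mul_add a hx j, Nat.testBit_two_pow_mul_add b hy j,
    Nat.testBit_two_pow_mul_add (a ^^^ b) hxy j]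
  by_cases hj : j < k
  · simp [hj, Nat.testBit_xor]
  · simp [hj, Nat.testBit_xor]

lemma pvMV_pc : ∀ l, (∀ d ∈ l, d < 10) → pvPC (pvMV l) = pvCS l := by
  intro l
  induction l with
  | nil => intro _; simp [pvMV, pvCS, pvPC_zero]
  | cons d t ih =>
    intro h
    have hd : d < 10 := h d (List.mem_cons_self)
    have h128 : (2 : Nat) ^ 7 = 128 := by norm_num
    have hmv : pvMV (d :: t) = 2 ^ 7 * pvMV t + pvSeg d := by
      rw [show pvMV (d :: t) = pvSeg d + 128 * pvMV t from rfl]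
      omega
    rw [hmv, pvPC_split 7 (pvMV t) (pvSeg d)
      (by have := pvSeg_lt d hd; omega)]
    rw [ih (fun x hx => h x (List.mem_cons_of_mem _ hx)), pvPC_seg d hd]
    simp [pvCS]; omega

lemma pvXS : ∀ l1 l2, (∀ d ∈ l1, d < 10) → (∀ d ∈ l2, d < 10) →
    (pvPC (pvMV l1 ^^^ pvMV l2) : Int)
      = (pvCS l1 : Int) + (pvCS l2 : Int) - (pvSX l1 l2 : Int) - (pvSX l2 l1 : Int) := by
  intro l1
  induction l1 with
  | nil =>
    intro l2 _ h2
    have hnil : pvMV ([] : List Nat) = 0 := rfl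
    rw [hnil, Nat.zero_xor, pvMV_pc l2 h2]
    simp [pvCS, pvSX]
  | cons d t ih =>
    intro l2 h1 h2
    cases l2 with
    | nil =>
      have hnil : pvMV ([] : List Nat) = 0 := rfl
      rw [hnil, Nat.xor_zero, pvMV_pc (d :: t) h1]
      simp [pvCS, pvSX]
    | cons e u =>
      have hd : d < 10 := h1 d (List.mem_cons_self)
      have he : e < 10 := h2 e (List.mem_cons_self)
      have ht : ∀ x ∈ t, x < 10 := fun x hx => h1 x (List.mem_cons_of_mem _ hx)
      have hu : ∀ x ∈ u, x < 10 := fun x hx => h2 x (List.mem_cons_of_mem _ hx)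
      have h128 : (2 : Nat) ^ 7 = 128 := by norm_num
      have hv1 : pvMV (d :: t) = 2 ^ 7 * pvMV t + pvSeg d := by
        rw [show pvMV (d :: t) = pvSeg d + 128 * pvMV t from rfl]; omega
      have hv2 : pvMV (e :: u) = 2 ^ 7 * pvMV u + pvSeg e := by
        rw [show pvMV (e :: u) = pvSeg e + 128 * pvMV u from rfl]; omega
      have hsd : pvSeg d < 2 ^ 7 := by have := pvSeg_lt d hd; omega
      have hse : pvSeg e < 2 ^ 7 := by have := pvSeg_lt e he; omega
      rw [hv1, hv2, pvXorSplit 7 _ _ _ _ hsd hse,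
        pvPC_split 7 _ _ (Nat.xor_lt_two_pow hsd hse)]
      have hc1 : pvCS (d :: t) = pvCnt (pvBits (pvSeg d)) + pvCS t := by simp [pvCS]
      have hc2 : pvCS (e :: u) = pvCnt (pvBits (pvSeg e)) + pvCS u := by simp [pvCS]
      have hs1 : pvSX (d :: t) (e :: u) = pvA7 (pvSeg d) (pvSeg e) + pvSX t u := by simp [pvSX]
      have hs2 : pvSX (e :: u) (d :: t) = pvA7 (pvSeg e) (pvSeg d) + pvSX u t := by simp [pvSX]
      have hih := ih u ht hu
      have hpair := pvPair d hd e he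
      rw [hc1, hc2, hs1, hs2]
      push_cast at hih ⊢
      omega

-- string-level structure
lemma pvCnt_append (l1 l2 : List Char) : pvCnt (l1 ++ l2) = pvCnt l1 + pvCnt l2 := by
  simp [pvCnt]

lemma pvCSS_eq (l : List Char) : count_segments_str l = (pvCnt l : Int) := by
  unfold count_segments_str pvCnt
  rw [PySem.List.sum_map_const_int]
  simp

lemma pvBB_cnt : ∀ v : List Nat, pvCnt (pvBB v) = (v.map (fun x => pvCnt (pvBits x))).sum := by
  intro v
  induction v with
  | nil => simp [pvBB, pvCnt]
  | cons x t ih =>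
    have : pvBB (x :: t) = pvBits x ++ pvBB t := by simp [pvBB]
    rw [this, pvCnt_append, ih]; simp

lemma pvBB_length : ∀ v : List Nat, (pvBB v).length = 7 * v.length := by
  intro v
  induction v with
  | nil => simp [pvBB]
  | cons x t ih =>
    have : pvBB (x :: t) = pvBits x ++ pvBB t := by simp [pvBB]
    rw [this]
    simp [pvBits, ih]
    omega

lemma pvBB_replicate0 : ∀ k, pvBB (List.replicate k 0) = List.replicate (7 * k) '0' := by
  intro k
  induction k with
  | zero => rfl
  | succ k ih =>
    rw [List.replicate_succ]
    have h1 : pvBB (0 :: List.replicate k 0) = pvBits 0 ++ pvBB (List.replicate k 0) := by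
      simp [pvBB]
    have h2 : pvBits 0 = List.replicate 7 '0' := by decide
    rw [h1, h2, ih, show 7 * (k + 1) = 7 + 7 * k from by ring, List.replicate_add]

lemma pvZipCnt : ∀ v1 v2 : List Nat, v1.length = v2.length →
    pvCnt (((pvBB v1).zip (pvBB v2)).map
        (fun ab => if ab.1 == '1' && ab.2 == '1' then '1' else '0'))
      = (List.zipWith pvA7 v1 v2).sum := by
  intro v1
  induction v1 with
  | nil =>
    intro v2 h
    have : v2 = [] := List.length_eq_zero_iff.mp h.symm
    subst this
    simp [pvBB, pvCnt]
  | cons x t ih =>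
    intro v2 h
    cases v2 with
    | nil => simp at h
    | cons y u =>
      have hb1 : pvBB (x :: t) = pvBits x ++ pvBB t := by simp [pvBB]
      have hb2 : pvBB (y :: u) = pvBits y ++ pvBB u := by simp [pvBB]
      rw [hb1, hb2, List.zip_append (by simp [pvBits]), List.map_append, pvCnt_append]
      have hh : pvCnt (((pvBits x).zip (pvBits y)).map
          (fun ab => if ab.1 == '1' && ab.2 == '1' then '1' else '0')) = pvA7 x y := rfl
      rw [hh, ih u (by simpa using h)]
      simp

lemma pvZipTake : ∀ (l1 : List Nat) (l2 : List Nat),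
    List.zipWith pvA7 (l1.take l2.length) l2 = List.zipWith pvA7 l1 l2 := by
  intro l1
  induction l1 with
  | nil => intro l2; simp
  | cons x t ih =>
    intro l2
    cases l2 with
    | nil => simp
    | cons y u => simp [ih u]

lemma pvZipTakeR : ∀ (l1 : List Nat) (l2 : List Nat),
    List.zipWith pvA7 l1 (l2.take l1.length) = List.zipWith pvA7 l1 l2 := by
  intro l1
  induction l1 with
  | nil => intro l2; simp
  | cons x t ih =>
    intro l2
    cases l2 with
    | nil => simp
    | cons y u => simp [ih u]

lemma pvZipRep : ∀ (l : List Nat) (k : Nat), (∀ x ∈ l, pvA7 x 0 = 0) →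
    (List.zipWith pvA7 l (List.replicate k 0)).sum = 0 := by
  intro l
  induction l with
  | nil => intro k _; simp
  | cons x t ih =>
    intro k h
    cases k with
    | zero => simp
    | succ k =>
      rw [List.replicate_succ]
      simp only [List.zipWith_cons_cons, List.sum_cons]
      rw [h x (List.mem_cons_self), ih k (fun y hy => h y (List.mem_cons_of_mem _ hy))]

lemma pvZipRepL : ∀ (k : Nat) (l : List Nat), (∀ y ∈ l, pvA7 0 y = 0) →
    (List.zipWith pvA7 (List.replicate k 0) l).sum = 0 := by
  intro k
  induction k with
  | zero => intro l _; simp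
  | succ k ih =>
    intro l h
    cases l with
    | nil => simp
    | cons y u =>
      rw [List.replicate_succ]
      simp only [List.zipWith_cons_cons, List.sum_cons]
      rw [h y (List.mem_cons_self), ih u (fun z hz => h z (List.mem_cons_of_mem _ hz))]

lemma pvZipPadR (v1 v2 : List Nat) (k : Nat) (h : v2.length + k = v1.length)
    (h0 : ∀ x ∈ v1, pvA7 x 0 = 0) :
    (List.zipWith pvA7 v1 (v2 ++ List.replicate k 0)).sum = (List.zipWith pvA7 v1 v2).sum := by
  conv_lhs => rw [← List.take_append_drop v2.length v1]
  rw [List.zipWith_append (by rw [List.length_take]; omega), List.sum_append,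
    pvZipRep _ k (fun x hx => h0 x (List.mem_of_mem_drop hx)), pvZipTake]
  omega

lemma pvZipPadL (v1 v2 : List Nat) (k : Nat) (h : v1.length + k = v2.length)
    (h0 : ∀ y ∈ v2, pvA7 0 y = 0) :
    (List.zipWith pvA7 (v1 ++ List.replicate k 0) v2).sum = (List.zipWith pvA7 v1 v2).sum := by
  conv_lhs => rw [← List.take_append_drop v1.length v2]
  rw [List.zipWith_append (by rw [List.length_take]; omega), List.sum_append,
    pvZipRepL k _ (fun y hy => h0 y (List.mem_of_mem_drop hy)), pvZipTakeR]
  omega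

lemma pvBB_append (u v : List Nat) : pvBB (u ++ v) = pvBB u ++ pvBB v := by
  simp [pvBB]

lemma pvAND (v1 v2 : List Nat) (h1 : ∀ x ∈ v1, pvA7 x 0 = 0) (h2 : ∀ y ∈ v2, pvA7 0 y = 0) :
    count_segments_str (string_and (pvBB v1.reverse) (pvBB v2.reverse))
      = ((List.zipWith pvA7 v1 v2).sum : Int) := by
  have hL1 : (pvBB v1.reverse).length = 7 * v1.length := by
    rw [pvBB_length, List.length_reverse]
  have hL2 : (pvBB v2.reverse).length = 7 * v2.length := by
    rw [pvBB_length, List.length_reverse]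
  unfold string_and
  rcases lt_trichotomy v1.length v2.length with hlt | heq | hgt
  · -- string2 is longer: second branch pads string1
    rw [if_neg (by omega), if_pos (by omega)]
    set k := v2.length - v1.length with hk
    have hpad : ((pvBB v1.reverse).reverse ++
        List.replicate ((pvBB v2.reverse).length - (pvBB v1.reverse).length) '0').reverse
        = pvBB ((v1 ++ List.replicate k 0).reverse) := by
      rw [hL1, hL2, show 7 * v2.length - 7 * v1.length = 7 * k from by omega,
        List.reverse_append, List.reverse_reverse, List.reverse_replicate,
        List.reverse_append, List.reverse_replicate, pvBB_append, pvBB_replicate0]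
    have hcnt := pvZipCnt ((v1 ++ List.replicate k 0).reverse) v2.reverse (by simp; omega)
    have hrev := (List.reverse_zipWith (f := pvA7) (l := v1 ++ List.replicate k 0) (l' := v2)
      (by simp; omega)).symm
    rw [hpad, pvCSS_eq, hcnt, hrev, List.sum_reverse, pvZipPadL v1 v2 k (by omega) h2]
  · rw [if_neg (by omega), if_neg (by omega), pvCSS_eq,
      pvZipCnt v1.reverse v2.reverse (by simp [heq]),
      ← List.reverse_zipWith (f := pvA7) (l := v1) (l' := v2) heq,
      List.sum_reverse]
  · -- string1 is longer: first branch pads string2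
    rw [if_pos (by omega)]
    set k := v1.length - v2.length with hk
    have hpad : ((pvBB v2.reverse).reverse ++
        List.replicate ((pvBB v1.reverse).length - (pvBB v2.reverse).length) '0').reverse
        = pvBB ((v2 ++ List.replicate k 0).reverse) := by
      rw [hL1, hL2, show 7 * v1.length - 7 * v2.length = 7 * k from by omega,
        List.reverse_append, List.reverse_reverse, List.reverse_replicate,
        List.reverse_append, List.reverse_replicate, pvBB_append, pvBB_replicate0]
    have hcnt := pvZipCnt v1.reverse ((v2 ++ List.replicate k 0).reverse) (by simp; omega)
    have hrev := (List.reverse_zipWith (f := pvA7) (l := v1) (l' := v2 ++ List.replicate k 0)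
      (by simp; omega)).symm
    rw [hpad, pvCSS_eq, hcnt, hrev, List.sum_reverse, pvZipPadR v1 v2 k (by omega) h1]

-- str(n) ↔ Nat.digits bridge
lemma pvBRcore : ∀ (fuel m : Nat) (ds : List Char), 0 < m → m ≤ fuel →
    Nat.toDigitsCore 10 fuel m ds = ((Nat.digits 10 m).map Nat.digitChar).reverse ++ ds := by
  intro fuel
  induction fuel with
  | zero => intro m ds h1 h2; omega
  | succ f ih =>
    intro m ds h1 h2
    rw [Nat.toDigitsCore]
    rw [Nat.digits_def' (by norm_num : (1 : Nat) < 10) h1]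
    by_cases h10 : m / 10 = 0
    · rw [if_pos h10, h10, Nat.digits_zero]
      simp
    · rw [if_neg h10,
        ih (m / 10) _ (Nat.pos_of_ne_zero h10)
          (by have := Nat.div_lt_self h1 (show 1 < 10 by norm_num); omega)]
      simp

lemma pvToChars (n : Int) (hn : 0 < n) :
    PySem.Int.toChars n = ((Nat.digits 10 n.toNat).map Nat.digitChar).reverse := by
  unfold PySem.Int.toChars
  rw [if_neg (by omega)]
  unfold Nat.toDigits
  rw [pvBRcore (n.toNat + 1) n.toNat [] (by omega) (by omega)]
  simp

lemma pvSegcat (a : Int) (ha : 0 < a) :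
    segcat a = pvBB (((pvDigits a).map pvSeg).reverse) := by
  unfold segcat
  rw [PySem.List.foldl_append_eq_flatMap, pvToChars a ha, List.nil_append]
  rw [List.flatMap_def, List.map_reverse, List.map_map]
  simp only [Function.comp_def]
  rw [List.map_congr_left
    (fun d hd => pvLookupA d (Nat.digits_lt_base (by norm_num) hd))]
  simp [pvBB, pvDigits, List.map_reverse, List.map_map, Function.comp_def]

lemma pvCount_segcat (a : Int) (ha : 0 < a) :
    count_segments_str (segcat a) = (pvCS (pvDigits a) : Int) := by
  rw [pvSegcat a ha, pvCSS_eq, pvBB_cnt]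
  unfold pvCS
  rw [List.map_reverse, List.sum_reverse, List.map_map]
  rfl

lemma pvSegZeroL (a : Int) : ∀ x ∈ (pvDigits a).map pvSeg, pvA7 x 0 = 0 := by
  intro x hx
  rcases List.mem_map.mp hx with ⟨d, hd, rfl⟩
  exact (pvA7_seg_zero d (Nat.digits_lt_base (by norm_num) hd)).1

lemma pvSegZeroR (a : Int) : ∀ y ∈ (pvDigits a).map pvSeg, pvA7 0 y = 0 := by
  intro y hy
  rcases List.mem_map.mp hy with ⟨d, hd, rfl⟩
  exact (pvA7_seg_zero d (Nat.digits_lt_base (by norm_num) hd)).2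

lemma pvChange_none (a : Int) (ha : 0 < a) : change a none = (pvCS (pvDigits a) : Int) := by
  unfold change
  simp only [Option.getD_none, Bool.false_eq_true, if_false]
  rw [pvCount_segcat a ha, pvSegcat a ha]
  rw [show ([] : List Char) = pvBB (([] : List Nat).reverse) from rfl]
  rw [pvAND ((pvDigits a).map pvSeg) [] (pvSegZeroL a) (by simp)]
  simp

lemma pvChange_some (a b : Int) (ha : 0 < a) (hb : 0 < b) :
    change a (some b) = (pvCS (pvDigits a) : Int) - (pvSX (pvDigits a) (pvDigits b) : Int) := by
  unfold change
  have hbt : (b != 0) = true := by simp; omega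
  simp only [hbt, if_pos, Option.getD_some]
  rw [pvCount_segcat a ha, pvSegcat a ha, pvSegcat b hb,
    pvAND ((pvDigits a).map pvSeg) ((pvDigits b).map pvSeg) (pvSegZeroL a) (pvSegZeroR b)]
  rw [List.zipWith_map]
  rfl

-- B-side characterization
lemma pvMaskGo : ∀ (fuel : Nat) (n m : Int) (shift : Nat), 0 < n → n.toNat ≤ fuel → 0 ≤ m →
    m.toNat < 2 ^ shift →
    maskB_go fuel n m shift = ((m.toNat + pvMV (pvDigits n) * 2 ^ shift : Nat) : Int) := by
  intro fuel
  induction fuel with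
  | zero => intro n m shift hn hf _ _; omega
  | succ f ih =>
    intro n m shift hn hf hm hlt
    have hteq : n = ((n.toNat : Nat) : Int) := by omega
    have htpos : 0 < n.toNat := by omega
    have hmod : PySem.Int.mod n 10 = ((n.toNat % 10 : Nat) : Int) := by
      conv_lhs => rw [hteq]
      exact_mod_cast PySem.Int.mod_natCast n.toNat 10
    have hdiv : PySem.Int.floordiv n 10 = ((n.toNat / 10 : Nat) : Int) := by
      conv_lhs => rw [hteq]
      exact_mod_cast PySem.Int.floordiv_natCast n.toNat 10
    have hseg : PySem.List.pyGetD segListB (PySem.Int.mod n 10) 0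
        = ((pvSeg (n.toNat % 10) : Nat) : Int) := by
      rw [hmod, PySem.List.pyGetD_natCast]
      exact pvLookupB (n.toNat % 10) (Nat.mod_lt _ (by norm_num))
    have hsegl : pvSeg (n.toNat % 10) < 128 := pvSeg_lt _ (Nat.mod_lt _ (by norm_num))
    have hbor : PySem.Int.bor m ((PySem.List.pyGetD segListB (PySem.Int.mod n 10) 0) <<< shift)
        = ((m.toNat + pvSeg (n.toNat % 10) * 2 ^ shift : Nat) : Int) := by
      rw [hseg, Int.shiftLeft_eq,
        show ((pvSeg (n.toNat % 10) : Nat) : Int) * 2 ^ shift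
          = ((pvSeg (n.toNat % 10) * 2 ^ shift : Nat) : Int) from (by push_cast; ring),
        PySem.Int.bor_of_nonneg hm (by positivity), Int.toNat_natCast,
        pvOrShift shift (pvSeg (n.toNat % 10)) m.toNat hlt]
    rw [show maskB_go (f + 1) n m shift
        = (if PySem.Int.floordiv n 10 == 0 then
            PySem.Int.bor m ((PySem.List.pyGetD segListB (PySem.Int.mod n 10) 0) <<< shift)
          else maskB_go f (PySem.Int.floordiv n 10)
            (PySem.Int.bor m ((PySem.List.pyGetD segListB (PySem.Int.mod n 10) 0) <<< shift))
            (shift + 7)) from rfl]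
    unfold pvDigits
    rw [Nat.digits_def' (by norm_num : (1 : Nat) < 10) htpos]
    by_cases h10 : n.toNat / 10 = 0
    · rw [if_pos (by rw [hdiv, h10]; simp), hbor, h10, Nat.digits_zero]
      rw [show pvMV [n.toNat % 10] = pvSeg (n.toNat % 10) + 128 * pvMV [] from rfl,
        show pvMV [] = 0 from rfl]
      norm_num
    · have hpow : (2 : Nat) ^ (shift + 7) = 2 ^ shift * 128 := by
        rw [pow_add]; norm_num
      rw [if_neg (by rw [hdiv]; simp only [beq_iff_eq, Nat.cast_eq_zero]; exact h10),
        hbor, hdiv,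
        ih ((n.toNat / 10 : Nat) : Int) _ (shift + 7)
          (by simp only [Nat.cast_pos]; exact Nat.pos_of_ne_zero h10)
          (by rw [Int.toNat_natCast]
              have := Nat.div_lt_self htpos (show 1 < 10 by norm_num); omega)
          (by positivity)
          (by rw [Int.toNat_natCast]
              have h2 : pvSeg (n.toNat % 10) * 2 ^ shift ≤ 127 * 2 ^ shift :=
                Nat.mul_le_mul_right _ (by omega)
              omega)]
      rw [Int.toNat_natCast]
      simp only [pvDigits, Int.toNat_natCast]
      rw [show pvMV (n.toNat % 10 :: Nat.digits 10 (n.toNat / 10))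
          = pvSeg (n.toNat % 10) + 128 * pvMV (Nat.digits 10 (n.toNat / 10)) from rfl]
      rw [Nat.cast_inj]
      rw [hpow]
      ring

lemma pvMask (a : Int) (ha : 0 < a) : maskB a = ((pvMV (pvDigits a) : Nat) : Int) := by
  unfold maskB
  rw [pvMaskGo (a.natAbs + 1) a 0 0 ha (by omega) (le_refl 0) (by simp)]
  simp

lemma pvDsumGo : ∀ (fuel : Nat) (n s : Int), 0 < n → n.toNat ≤ fuel →
    dsumB_go fuel n s = s + ((pvDigits n).sum : Int) := by
  intro fuel
  induction fuel with
  | zero => intro n s hn hf; omega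
  | succ f ih =>
    intro n s hn hf
    have htpos : 0 < n.toNat := by omega
    have hteq : n = ((n.toNat : Nat) : Int) := by omega
    have hmod : PySem.Int.mod n 10 = ((n.toNat % 10 : Nat) : Int) := by
      conv_lhs => rw [hteq]
      exact_mod_cast PySem.Int.mod_natCast n.toNat 10
    have hdiv : PySem.Int.floordiv n 10 = ((n.toNat / 10 : Nat) : Int) := by
      conv_lhs => rw [hteq]
      exact_mod_cast PySem.Int.floordiv_natCast n.toNat 10
    rw [show dsumB_go (f + 1) n s
        = (if n == 0 then s
           else dsumB_go f (PySem.Int.floordiv n 10) (s + PySem.Int.mod n 10)) from rfl]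
    rw [if_neg (by simp; omega), hmod, hdiv]
    unfold pvDigits
    rw [Nat.digits_def' (by norm_num : (1 : Nat) < 10) htpos]
    by_cases h10 : n.toNat / 10 = 0
    · have hzero : ∀ (fu : Nat) (s' : Int), dsumB_go fu (0 : Int) s' = s' := by
        intro fu s'; cases fu <;> simp [dsumB_go]
      rw [h10, Nat.cast_zero, hzero, Nat.digits_zero]
      simp
    · rw [ih _ _ (by simp only [Nat.cast_pos]; exact Nat.pos_of_ne_zero h10)
        (by rw [Int.toNat_natCast]
            have := Nat.div_lt_self htpos (show 1 < 10 by norm_num); omega)]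
      simp only [pvDigits, Int.toNat_natCast, List.sum_cons]
      push_cast
      ring

lemma pvDsumB (n : Int) (hn : 0 < n) : dsumB n = ((pvDigits n).sum : Int) := by
  unfold dsumB
  rw [pvDsumGo (n.natAbs + 1) n 0 hn (by omega)]
  simp

lemma pvStep (n : Int) (hn : 0 < n) : digital_sum n = if n < 10 then 0 else dsumB n := by
  have htpos : 0 < n.toNat := by omega
  unfold digital_sum
  rw [pvToChars n hn]
  simp only [List.length_reverse, List.length_map]
  have hlen0 : (Nat.digits 10 n.toNat) ≠ [] := Nat.digits_ne_nil_iff_ne_zero.mpr (by omega)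
  have hlenpos : (Nat.digits 10 n.toNat).length ≠ 0 := by
    simpa using hlen0
  have hlen1 : (Nat.digits 10 n.toNat).length = 1 ↔ n < 10 := by
    constructor
    · intro h
      have h2 : n.toNat < 10 ^ 1 := (Nat.digits_length_le_iff (by norm_num) _).mp (le_of_eq h)
      have h3 : n.toNat < 10 := by simpa using h2
      omega
    · intro h
      have h2 : (Nat.digits 10 n.toNat).length ≤ 1 :=
        (Nat.digits_length_le_iff (by norm_num) _).mpr (by simp; omega)
      omega
  by_cases h10 : n < 10
  · rw [if_pos (by simp only [beq_iff_eq]; exact hlen1.mpr h10), if_pos h10]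
  · rw [if_neg (by simp only [beq_iff_eq]; rw [hlen1]; exact h10), if_neg h10]
    rw [PySem.List.foldl_add]
    rw [List.map_reverse, List.sum_reverse, List.map_map]
    simp only [Function.comp_def]
    rw [List.map_congr_left (fun d hd => pvDigitVal d (Nat.digits_lt_base (by norm_num) hd))]
    rw [pvDsumB n hn]
    simp [pvDigits, Nat.cast_list_sum]

lemma pvStep_nonneg (n : Int) (hn : 0 < n) : 0 ≤ digital_sum n := by
  by_cases h : n < 10
  · simp [pvStep n hn, h]
  · rw [pvStep n hn, if_neg h, pvDsumB n hn]
    positivity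

lemma pvChainEq : ∀ (fuel : Nat) (n : Int), 0 ≤ n → chainA fuel n = chainB fuel n := by
  intro fuel
  induction fuel with
  | zero => intro n hn; rfl
  | succ f ih =>
    intro n hn
    rw [show chainA (f + 1) n = if n == 0 then [] else n :: chainA f (digital_sum n) from rfl,
      show chainB (f + 1) n
        = if n == 0 then [] else n :: chainB f (if n < 10 then 0 else dsumB n) from rfl]
    by_cases h0 : n = 0
    · simp [h0]
    · rw [if_neg (by simp [h0]), if_neg (by simp [h0])]
      have hpos : 0 < n := by omega
      rw [pvStep n hpos]
      congr 1
      by_cases h10 : n < 10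
      · rw [if_pos h10]; exact ih 0 (le_refl 0)
      · rw [if_neg h10]
        exact ih _ (by rw [pvDsumB n hpos]; positivity)

lemma pvChainPos : ∀ (fuel : Nat) (n : Int), 0 ≤ n → ∀ x ∈ chainA fuel n, 0 < x := by
  intro fuel
  induction fuel with
  | zero => intro n hn x hx; simp [chainA] at hx
  | succ f ih =>
    intro n hn x hx
    rw [show chainA (f + 1) n
        = if n == 0 then [] else n :: chainA f (digital_sum n) from rfl] at hx
    by_cases h0 : n = 0
    · simp [h0] at hx
    · rw [if_neg (by simp [h0])] at hx
      have hpos : 0 < n := by omega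
      rcases List.mem_cons.mp hx with rfl | hmem
      · exact hpos
      · exact ih _ (pvStep_nonneg n hpos) x hmem

-- number-level meeting points
lemma pvPC_B (a : Int) (ha : 0 < a) : pcB (maskB a) = (pvCS (pvDigits a) : Int) := by
  unfold pcB
  rw [pvMask a ha]
  rw [show PySem.Int.bitCount ((pvMV (pvDigits a) : Nat) : Int)
      = pvPC (pvMV (pvDigits a)) from rfl]
  rw [pvMV_pc (pvDigits a)
    (fun d hd => Nat.digits_lt_base (by norm_num) (by simpa [pvDigits] using hd))]

lemma pvPCeq (a : Int) (ha : 0 < a) : change a none = pcB (maskB a) := by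
  rw [pvChange_none a ha, pvPC_B a ha]

lemma pvPairLem (a b : Int) (ha : 0 < a) (hb : 0 < b) :
    change a (some b) + change b (some a) = pcB (PySem.Int.bxor (maskB a) (maskB b)) := by
  rw [pvChange_some a b ha hb, pvChange_some b a hb ha]
  unfold pcB
  rw [pvMask a ha, pvMask b hb, PySem.Int.bxor_natCast]
  rw [show PySem.Int.bitCount ((pvMV (pvDigits a) ^^^ pvMV (pvDigits b) : Nat) : Int)
      = pvPC (pvMV (pvDigits a) ^^^ pvMV (pvDigits b)) from rfl]
  rw [pvXS (pvDigits a) (pvDigits b)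
    (fun d hd => Nat.digits_lt_base (by norm_num) hd)
    (fun d hd => Nat.digits_lt_base (by norm_num) hd)]
  ring

lemma pvRange1 (g : Nat → Int) (m : Nat) :
    ((List.range (m + 1)).map g).sum = g 0 + ((List.range m).map (fun k => g (k + 1))).sum := by
  rw [List.range_succ_eq_map, List.map_cons, List.sum_cons, List.map_map]
  simp [Function.comp_def]

lemma pvRange2 (g : Nat → Int) (m : Nat) :
    ((List.range (m + 1)).map g).sum = ((List.range m).map g).sum + g m := by
  rw [List.range_succ, List.map_append, List.sum_append]
  simp

-- the main loop identity
lemma pvMain (xs : List Int) (hpos : ∀ x ∈ xs, 0 < x) : toggleLoop xs = totalB xs := by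
  cases xs with
  | nil => rfl
  | cons x rest =>
    set m := rest.length with hm
    have hne : (x :: rest) ≠ [] := by simp
    have hlen : (x :: rest).length = m + 1 := by simp [hm]
    have hX : ∀ k, k < m + 1 → 0 < (x :: rest).getD k 0 := by
      intro k hk
      rw [List.getD_eq_getElem _ _ (by omega)]
      exact hpos _ (List.getElem_mem _)
    have henum : PySem.List.enumerate (x :: rest)
        = (List.range (m + 1)).map (fun (k : Nat) => ((k : Int), (x :: rest).getD k 0)) := by
      apply List.ext_getElem
      · simp [PySem.List.length_enumerate, hm]
      · intro i h1 h2
        have hi : i < m + 1 := by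
          simpa [PySem.List.length_enumerate, hm] using h1
        rw [PySem.List.getElem_enumerate]
        simp only [List.getElem_map, List.getElem_range]
        rw [List.getD_eq_getElem _ _ (by omega)]
        simp
    -- A side
    have hA : toggleLoop (x :: rest)
        = change ((x :: rest).getD 0 0) none + change ((x :: rest).getD m 0) none
          + (((List.range m).map (fun k =>
              change ((x :: rest).getD (k + 1) 0) (some ((x :: rest).getD k 0)))).sum
            + ((List.range m).map (fun k =>
              change ((x :: rest).getD k 0) (some ((x :: rest).getD (k + 1) 0)))).sum) := by
      unfold toggleLoop
      rw [show (fun (toggles : Int) (p : Int × Int) =>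
          toggles +
            (if p.1 == 0 then change p.2 none
             else change p.2 (some (PySem.List.pyGetD (x :: rest) (p.1 - 1) 0))) +
            (if p.1 == ((x :: rest).length : Int) - 1 then change p.2 none
             else change p.2 (some (PySem.List.pyGetD (x :: rest) (p.1 + 1) 0))))
        = (fun (toggles : Int) (p : Int × Int) =>
            toggles +
            ((if p.1 == 0 then change p.2 none
             else change p.2 (some (PySem.List.pyGetD (x :: rest) (p.1 - 1) 0))) +
            (if p.1 == ((x :: rest).length : Int) - 1 then change p.2 none
             else change p.2 (some (PySem.List.pyGetD (x :: rest) (p.1 + 1) 0)))))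
        from (by funext t p; ring)]
      rw [PySem.List.foldl_add, zero_add, henum, List.map_map]
      have hG : ∀ k ∈ List.range (m + 1),
          ((fun (p : Int × Int) =>
            (if p.1 == 0 then change p.2 none
             else change p.2 (some (PySem.List.pyGetD (x :: rest) (p.1 - 1) 0))) +
            (if p.1 == ((x :: rest).length : Int) - 1 then change p.2 none
             else change p.2 (some (PySem.List.pyGetD (x :: rest) (p.1 + 1) 0)))) ∘
           (fun (k : Nat) => ((k : Int), (x :: rest).getD k 0))) k
          = (if k = 0 then change ((x :: rest).getD k 0) none
             else change ((x :: rest).getD k 0) (some ((x :: rest).getD (k - 1) 0)))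
            + (if k = m then change ((x :: rest).getD k 0) none
               else change ((x :: rest).getD k 0) (some ((x :: rest).getD (k + 1) 0))) := by
        intro k hk
        have hk' : k < m + 1 := List.mem_range.mp hk
        simp only [Function.comp_def]
        congr 1
        · by_cases h0 : k = 0
          · subst h0; simp
          · rw [if_neg (by simp only [beq_iff_eq, Nat.cast_eq_zero]; exact h0), if_neg h0]
            rw [show ((k : Int)) - 1 = ((k - 1 : Nat) : Int) from (by omega),
              PySem.List.pyGetD_natCast]
        · by_cases hkm : k = m
          · subst hkm
            rw [if_pos (by simp only [beq_iff_eq, hlen]; push_cast; ring), if_pos rfl]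
          · rw [if_neg (by simp only [beq_iff_eq, hlen]; push_cast; omega), if_neg hkm]
            rw [show ((k : Int)) + 1 = ((k + 1 : Nat) : Int) from (by push_cast; ring),
              PySem.List.pyGetD_natCast]
      rw [List.map_congr_left hG, PySem.List.sum_map_add_int, pvRange1, pvRange2]
      rw [if_pos (rfl : (0 : Nat) = 0), if_pos (rfl : m = m)]
      have hF1 : (List.range m).map (fun k =>
          if k + 1 = 0 then change ((x :: rest).getD (k + 1) 0) none
          else change ((x :: rest).getD (k + 1) 0) (some ((x :: rest).getD (k + 1 - 1) 0)))
          = (List.range m).map (fun k =>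
            change ((x :: rest).getD (k + 1) 0) (some ((x :: rest).getD k 0))) :=
        List.map_congr_left (fun k _ => by simp)
      have hF2 : (List.range m).map (fun k =>
          if k = m then change ((x :: rest).getD k 0) none
          else change ((x :: rest).getD k 0) (some ((x :: rest).getD (k + 1) 0)))
          = (List.range m).map (fun k =>
            change ((x :: rest).getD k 0) (some ((x :: rest).getD (k + 1) 0))) :=
        List.map_congr_left (fun k hk => by
          simp [Nat.ne_of_lt (List.mem_range.mp hk)])
      rw [hF1, hF2]
      ring
    -- B side
    have hzip : (x :: rest).zip (x :: rest).tail
        = (List.range m).map (fun k => ((x :: rest).getD k 0, (x :: rest).getD (k + 1) 0)) := by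
      apply List.ext_getElem
      · simp [hm]
      · intro i h1 h2
        have hi : i < m := by simpa [hm] using h1
        simp only [List.getElem_zip, List.getElem_tail, List.getElem_map, List.getElem_range]
        rw [List.getD_eq_getElem _ _ (by omega), List.getD_eq_getElem _ _ (by omega)]
    have hB : totalB (x :: rest)
        = pcB (maskB ((x :: rest).getD 0 0)) + pcB (maskB ((x :: rest).getD m 0))
          + ((List.range m).map (fun k =>
              pcB (PySem.Int.bxor (maskB ((x :: rest).getD k 0))
                (maskB ((x :: rest).getD (k + 1) 0))))).sum := by
      unfold totalB
      rw [if_neg (by simp)]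
      rw [PySem.List.pyGetD_zero, PySem.List.pyGetD_neg_one _ _ hne, List.getLast_eq_getElem,
        ← List.getD_eq_getElem (x :: rest) 0
          (show (x :: rest).length - 1 < (x :: rest).length from (by simp)),
        show (x :: rest).length - 1 = m from (by simp [hm])]
      rw [PySem.List.foldl_add, hzip, List.map_map]
      simp only [Function.comp_def]
    have hmerge : ((List.range m).map (fun k =>
          change ((x :: rest).getD (k + 1) 0) (some ((x :: rest).getD k 0)))).sum
        + ((List.range m).map (fun k =>
          change ((x :: rest).getD k 0) (some ((x :: rest).getD (k + 1) 0)))).sum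
        = ((List.range m).map (fun k =>
          change ((x :: rest).getD (k + 1) 0) (some ((x :: rest).getD k 0))
          + change ((x :: rest).getD k 0) (some ((x :: rest).getD (k + 1) 0)))).sum :=
      (PySem.List.sum_map_add_int (List.range m) _ _).symm
    have hpair : (List.range m).map (fun k =>
          change ((x :: rest).getD (k + 1) 0) (some ((x :: rest).getD k 0))
          + change ((x :: rest).getD k 0) (some ((x :: rest).getD (k + 1) 0)))
        = (List.range m).map (fun k =>
          pcB (PySem.Int.bxor (maskB ((x :: rest).getD k 0))
            (maskB ((x :: rest).getD (k + 1) 0)))) :=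
      List.map_congr_left (fun k hk => by
        have hk' : k < m := List.mem_range.mp hk
        rw [pvPairLem _ _ (hX (k + 1) (by omega)) (hX k (by omega)),
          PySem.Int.bxor_comm])
    rw [hA, hB, pvPCeq _ (hX 0 (by omega)), pvPCeq _ (hX m (by omega)), hmerge, hpair]

-- ===== VERDICT (by name: the statement is the Claim_ definition above) =====
theorem efficient_toggle_spec : Claim_equal_efficient_toggle := by
  intro num _hdom hpre
  unfold Spec_efficient_toggle efficient_toggle efficient_toggle_alt
  rw [← pvChainEq _ _ hpre]
  exact pvMain _ (pvChainPos _ _ hpre)
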